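-- pv_equiv track=rewrite | github.com/lamaydt1986/Digconv | Root.py | facopse
-- ===== SOURCE A (Python) =====
-- def positse (w):
--
-- 	n=len(w)
-- 	r=[]
-- 	for i in range (n):
-- 		if w[i]==3:
-- 			r.append(i)
-- 	return(r)
--
-- def facopse(w):     #donne la suite des fractions sous forme de 1/k
-- 	s=positse(w)
-- 	n=len(w)
-- 	k=[]
-- 	a=0
-- 	for i in s:
-- 		k.append(w[a:i+1].count(3))
-- 		k.append(w[a:i+1].count(2))
-- 		a=i+1
-- 	if s[-1]!=n-1:
-- 		k.append(0)
-- 		k.append(n-s[-1]-1)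
-- 	return (k)
-- ===== SOURCE B (Python) =====
-- def facopse(w):     #donne la suite des fractions sous forme de 1/k
--     n = len(w)
--     # prefix table: p[j] = number of 2s in w[:j]
--     p = [0]
--     for x in w:
--         p.append(p[-1] + (1 if x == 2 else 0))
--     s = [i for i, x in enumerate(w) if x == 3]
--     k = []
--     a = 0
--     for i in s:
--         k.append(1)                # each segment ends at its only 3
--         k.append(p[i + 1] - p[a])  # 2-count by table subtraction
--         a = i + 1
--     if s[-1] != n - 1:
--         k.append(0)
--         k.append(n - s[-1] - 1)
--     return k
-- ===== Notes on version B (the rewrite author's own statement) =====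
-- stated objective: alternative
-- what changed: B replaces A's per-segment slicing with double counting by a one-pass prefix-sum table of 2s (segment 2-count = p[i+1]-p[a]) and the constant 1 for the 3-count, with the 3-positions taken from a single enumerate pass instead of the positse helper.
import Mathlib
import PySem

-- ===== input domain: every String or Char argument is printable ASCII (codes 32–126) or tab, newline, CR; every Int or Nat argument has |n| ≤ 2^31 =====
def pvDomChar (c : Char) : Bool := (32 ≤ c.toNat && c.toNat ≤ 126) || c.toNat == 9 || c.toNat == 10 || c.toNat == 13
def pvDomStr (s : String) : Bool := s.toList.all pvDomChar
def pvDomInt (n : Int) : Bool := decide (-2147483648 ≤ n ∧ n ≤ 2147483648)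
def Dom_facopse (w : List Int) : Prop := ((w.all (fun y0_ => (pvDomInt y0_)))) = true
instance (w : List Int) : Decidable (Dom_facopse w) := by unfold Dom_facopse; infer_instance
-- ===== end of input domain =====

-- B computes each segment's 2-count by subtracting entries of a prefix-sum table
-- (and the 3-count as the constant 1) instead of slicing and rescanning (one honest line).

-- ===== PORT A =====
def positse (w : List Int) : List Int :=
  (List.range w.length).foldl
    (fun r i => if w.getD i 0 = 3 then r ++ [(i : Int)] else r) []

def facopse (w : List Int) : List Int :=
  let s := positse w
  let n : Int := w.length
  let st := s.foldl
    (fun (st : List Int × Int) i =>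
      (st.1 ++ [((PySem.List.slice w (some st.2) (some (i + 1))).count 3 : Int),
                ((PySem.List.slice w (some st.2) (some (i + 1))).count 2 : Int)],
       i + 1))
    ([], 0)
  let k := st.1
  -- Python raises IndexError here when the position list is empty; those inputs are outside Pre_facopse
  match s.getLast? with
  | none => k
  | some l => if l ≠ n - 1 then k ++ [0, n - l - 1] else k

-- ===== PORT B =====
def facopse_alt (w : List Int) : List Int :=
  let n : Int := w.length
  let p := w.foldl
    (fun (p : List Int) x => p ++ [(p.getLast?.getD 0) + (if x = 2 then 1 else 0)]) [0]
  let s := ((PySem.List.enumerate w 0).filter (fun ix => ix.2 == 3)).map (·.1)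
  let st := s.foldl
    (fun (st : List Int × Int) i =>
      (st.1 ++ [1, PySem.List.pyGetD p (i + 1) 0 - PySem.List.pyGetD p st.2 0],
       i + 1))
    ([], 0)
  let k := st.1
  match s.getLast? with
  | none => k
  | some l => if l ≠ n - 1 then k ++ [0, n - l - 1] else k

-- ===== PRECONDITION & SPEC =====
-- Pre_ excludes exactly the 3-free inputs, where Python A (and Python B alike) raises IndexError indexing the empty list of 3-positions.
def Pre_facopse (w : List Int) : Prop := (3 : Int) ∈ w
instance (w : List Int) : Decidable (Pre_facopse w) := by unfold Pre_facopse; infer_instance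
def pvWitness_facopse : List Int := [2, 3, 1]

def Spec_facopse (w : List Int) (out : List Int) : Prop := out = facopse_alt w
instance (w : List Int) (out : List Int) : Decidable (Spec_facopse w out) := by unfold Spec_facopse; infer_instance

-- ===== CLAIM (what is proved, stated in full; the proofs are below) =====
def Claim_equal_facopse : Prop := ∀ (w : List Int), Dom_facopse w → Pre_facopse w → Spec_facopse w (facopse w)

-- ===== LEMMAS AND PROOFS =====

-- positions of 3 in u, indexed from s
def posIdx : List Int → Nat → List Nat
  | [], _ => []
  | x :: xs, s => if x = 3 then s :: posIdx xs (s + 1) else posIdx xs (s + 1)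

-- structural facts about consecutive 3-positions that the loop proof consumes
def GoodS (w : List Int) (a : Nat) (s : List Nat) : Prop :=
  match s with
  | [] => True
  | i :: t => a ≤ i ∧ i < w.length ∧ w.getD i 0 = 3 ∧
      (∀ j, a ≤ j → j < i → w.getD j 0 ≠ 3) ∧ GoodS w (i + 1) t

theorem positse_aux (w : List Int) :
    ∀ (m a : Nat) (r : List Int), a + m = w.length →
    (List.range' a m).foldl (fun r i => if w.getD i 0 = 3 then r ++ [(i : Int)] else r) r
      = r ++ List.map (fun (i : Nat) => (i : Int)) (posIdx (w.drop a) a) := by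
  intro m
  induction m with
  | zero =>
    intro a r h
    have hd : w.drop a = [] := List.drop_eq_nil_iff.mpr (by omega)
    simp [hd, posIdx]
  | succ m ih =>
    intro a r h
    have ha : a < w.length := by omega
    have hd : w.drop a = w[a] :: w.drop (a + 1) := List.drop_eq_getElem_cons ha
    have hg : w.getD a 0 = w[a] := List.getD_eq_getElem w 0 ha
    rw [List.range'_succ, List.foldl_cons, hd]
    have hp : posIdx (w[a] :: w.drop (a + 1)) a
        = if w[a] = 3 then a :: posIdx (w.drop (a + 1)) (a + 1)
          else posIdx (w.drop (a + 1)) (a + 1) := rfl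
    by_cases h3 : w[a] = 3
    · rw [hg, if_pos h3, ih (a + 1) (r ++ [(a : Int)]) (by omega), hp, if_pos h3]
      simp
    · rw [hg, if_neg h3, ih (a + 1) r (by omega), hp, if_neg h3]

theorem positse_eq (w : List Int) :
    positse w = List.map (fun (i : Nat) => (i : Int)) (posIdx w 0) := by
  unfold positse
  rw [List.range_eq_range']
  simpa using positse_aux w w.length 0 [] (by omega)

theorem s_alt_eq : ∀ (u : List Int) (s : Nat),
    ((PySem.List.enumerate u (s : Int)).filter (fun ix => ix.2 == 3)).map (·.1)
      = List.map (fun (i : Nat) => (i : Int)) (posIdx u s) := by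
  intro u
  induction u with
  | nil => intro s; simp [PySem.List.enumerate_nil, posIdx]
  | cons x xs ih =>
    intro s
    rw [PySem.List.enumerate_cons]
    have hc : ((s : Int) + 1) = ((s + 1 : Nat) : Int) := by push_cast; ring
    have hp : posIdx (x :: xs) s
        = if x = 3 then s :: posIdx xs (s + 1) else posIdx xs (s + 1) := rfl
    by_cases h3 : x = 3
    · rw [hp, if_pos h3, List.filter_cons_of_pos (by simp [h3]), List.map_cons, hc,
        ih (s + 1), List.map_cons]
    · rw [hp, if_neg h3, List.filter_cons_of_neg (by simp [h3]), hc, ih (s + 1)]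

theorem p_spec (w : List Int) :
    w.foldl (fun (p : List Int) x => p ++ [(p.getLast?.getD 0) + (if x = 2 then 1 else 0)]) [0]
      = (List.range (w.length + 1)).map (fun j => ((w.take j).count 2 : Int)) := by
  induction w using List.reverseRecOn with
  | nil => simp
  | append_singleton w x ih =>
    rw [List.foldl_append, ih, List.foldl_cons, List.foldl_nil]
    have hlast : ((List.range (w.length + 1)).map (fun j => ((w.take j).count 2 : Int))).getLast?
        = some ((w.count 2 : Int)) := by
      rw [List.range_succ, List.map_append]
      simp
    rw [hlast]
    have hlen : (w ++ [x]).length + 1 = (w.length + 1) + 1 := by simp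
    rw [hlen]
    conv_rhs => rw [List.range_succ, List.map_append]
    have hmap : (List.range (w.length + 1)).map (fun j => (((w ++ [x]).take j).count 2 : Int))
        = (List.range (w.length + 1)).map (fun j => ((w.take j).count 2 : Int)) := by
      apply List.map_congr_left
      intro j hj
      rw [List.take_append_of_le_length (by simp at hj; omega)]
    rw [hmap]
    congr 1
    have htake : (w ++ [x]).take (w.length + 1) = w ++ [x] :=
      List.take_of_length_le (by simp)
    simp only [List.map_cons, List.map_nil, htake, List.count_append, Option.getD_some]
    by_cases h2 : x = 2 <;> simp [h2, List.count_nil]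

theorem goodS_shift (w : List Int) (a : Nat) (s : List Nat)
    (h : GoodS w (a + 1) s) (hna : w.getD a 0 ≠ 3) : GoodS w a s := by
  cases s with
  | nil => trivial
  | cons i t =>
    obtain ⟨h1, h2, h3, h4, h5⟩ := h
    refine ⟨by omega, h2, h3, ?_, h5⟩
    intro j hj1 hj2
    rcases Nat.eq_or_lt_of_le hj1 with rfl | hlt
    · exact hna
    · exact h4 j (by omega) hj2

theorem goodS_posIdx : ∀ (u : List Int) (w : List Int) (a : Nat),
    w.drop a = u → GoodS w a (posIdx u a) := by
  intro u
  induction u with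
  | nil => intro w a _; trivial
  | cons x xs ih =>
    intro w a hu
    have ha : a < w.length := by
      by_contra h
      have hnil : w.drop a = [] := List.drop_eq_nil_iff.mpr (by omega)
      rw [hu] at hnil; simp at hnil
    have hd : w.drop a = w[a] :: w.drop (a + 1) := List.drop_eq_getElem_cons ha
    have hinj := hu.symm.trans hd
    injection hinj with e1 e2
    have hx : w.getD a 0 = x := by rw [List.getD_eq_getElem w 0 ha, ← e1]
    simp only [posIdx]
    by_cases h3 : x = 3
    · rw [if_pos h3]
      exact ⟨le_refl a, ha, by rw [hx, h3], fun j hj1 hj2 => by omega,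
        ih w (a + 1) e2.symm⟩
    · rw [if_neg h3]
      exact goodS_shift w a _ (ih w (a + 1) e2.symm) (by rw [hx]; exact h3)

theorem seg_count2 (w : List Int) (a i : Nat) (ha : a ≤ i) :
    (((w.drop a).take (i + 1 - a)).count 2 : Int)
      = ((w.take (i + 1)).count 2 : Int) - ((w.take a).count 2 : Int) := by
  have h : w.take (i + 1) = w.take a ++ (w.drop a).take (i + 1 - a) := by
    conv_lhs => rw [show i + 1 = a + (i + 1 - a) by omega]
    exact List.take_add
  rw [h, List.count_append]
  push_cast; ring

theorem seg_count3 (w : List Int) (a i : Nat) (ha : a ≤ i) (hi : i < w.length)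
    (h3 : w.getD i 0 = 3) (hno : ∀ j, a ≤ j → j < i → w.getD j 0 ≠ 3) :
    ((w.drop a).take (i + 1 - a)).count 3 = 1 := by
  have hstep : i + 1 - a = (i - a) + 1 := by omega
  have hidx : i - a < (w.drop a).length := by simp; omega
  rw [hstep, List.take_add_one]
  have hget : (w.drop a)[i - a]? = some w[i] := by
    rw [List.getElem?_eq_getElem hidx, List.getElem_drop]
    congr 2; omega
  rw [hget, List.count_append]
  have hz : ((w.drop a).take (i - a)).count 3 = 0 := by
    rw [List.count_eq_zero]
    intro hmem
    obtain ⟨j, hj, hje⟩ := List.mem_iff_getElem.mp hmem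
    have hjlen : j < i - a := by
      have := hj; simp at this; omega
    have hja : a + j < w.length := by omega
    rw [List.getElem_take, List.getElem_drop] at hje
    exact hno (a + j) (by omega) (by omega)
      (by rw [List.getD_eq_getElem w 0 hja, hje])
  have hw3 : w[i] = 3 := by rw [← List.getD_eq_getElem w 0 hi, h3]
  simp [hz, hw3]

theorem loop_eq (w : List Int) :
    ∀ (s : List Nat) (k : List Int) (a : Nat), GoodS w a s →
      ((List.map (fun (i : Nat) => (i : Int)) s).foldl
        (fun (st : List Int × Int) i =>
          (st.1 ++ [((PySem.List.slice w (some st.2) (some (i + 1))).count 3 : Int),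
                    ((PySem.List.slice w (some st.2) (some (i + 1))).count 2 : Int)],
           i + 1)) (k, (a : Int)))
      = ((List.map (fun (i : Nat) => (i : Int)) s).foldl
        (fun (st : List Int × Int) i =>
          (st.1 ++ [1, PySem.List.pyGetD ((List.range (w.length + 1)).map (fun j => ((w.take j).count 2 : Int))) (i + 1) 0
                      - PySem.List.pyGetD ((List.range (w.length + 1)).map (fun j => ((w.take j).count 2 : Int))) st.2 0],
           i + 1)) (k, (a : Int))) := by
  intro s
  induction s with
  | nil => intro k a _; rfl
  | cons i t ih =>
    intro k a hg
    obtain ⟨h1, h2, h3, h4, h5⟩ := hg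
    simp only [List.map_cons, List.foldl_cons]
    have hcast : ((i : Int) + 1) = ((i + 1 : Nat) : Int) := by push_cast; ring
    rw [hcast]
    have hslice : PySem.List.slice w (some (a : Int)) (some ((i + 1 : Nat) : Int))
        = (w.drop a).take (i + 1 - a) := PySem.List.slice_natCast w a (i + 1)
    have e3 : ((PySem.List.slice w (some (a : Int)) (some ((i + 1 : Nat) : Int))).count 3 : Int) = 1 := by
      rw [hslice, seg_count3 w a i h1 h2 h3 h4]; norm_num
    have e2 : ((PySem.List.slice w (some (a : Int)) (some ((i + 1 : Nat) : Int))).count 2 : Int)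
        = PySem.List.pyGetD ((List.range (w.length + 1)).map (fun j => ((w.take j).count 2 : Int))) ((i + 1 : Nat) : Int) 0
          - PySem.List.pyGetD ((List.range (w.length + 1)).map (fun j => ((w.take j).count 2 : Int))) ((a : Nat) : Int) 0 := by
      rw [hslice, PySem.List.pyGetD_natCast, PySem.List.pyGetD_natCast,
          PySem.List.getD_map_range _ _ _ _ (by omega),
          PySem.List.getD_map_range _ _ _ _ (by omega),
          seg_count2 w a i h1]
    rw [e3, e2]
    exact ih (k ++ [1, PySem.List.pyGetD ((List.range (w.length + 1)).map (fun j => ((w.take j).count 2 : Int))) ((i + 1 : Nat) : Int) 0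
          - PySem.List.pyGetD ((List.range (w.length + 1)).map (fun j => ((w.take j).count 2 : Int))) ((a : Nat) : Int) 0]) (i + 1) h5

-- ===== VERDICT (by name: the statement is the Claim_ definition above) =====
theorem facopse_spec : Claim_equal_facopse := by
  intro w _ _
  have h := loop_eq w (posIdx w 0) [] 0 (goodS_posIdx w w 0 (by simp))
  simp only [Nat.cast_zero] at h
  have h2 := s_alt_eq w 0
  simp only [Nat.cast_zero] at h2
  simp only [Spec_facopse, facopse, facopse_alt, positse_eq, p_spec]
  rw [h2, h]
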